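-- pv_equiv track=rewrite | github.com/NeuralContext/language-translator | src/language_translator/main.py | parse_qa
-- ===== SOURCE A (Python) =====
-- from typing import List, Tuple
--
-- def parse_qa(text: str) -> List[Tuple[str, str]]:
--     """
--     Parses text into a list of question-answer pairs, supporting multiline questions.
--
--     Parameters:
--         text (str): The input text containing questions and answers.
--
--     Returns:
--         List[Tuple[str, str]]: A list of tuples where each tuple contains a question and its corresponding answer.
--     """
--     # Initialize variables
--     qa_pairs = []
--     current_q = ""
--     current_a = ""
--     collecting_q = False  # Flag to indicate if we are currently collecting question lines
--
--     # Process each line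
--     for line in text.split('\n'):
--         if line.startswith('#'):
--             if collecting_q:
--                 # Continue appending to current question
--                 current_q += line[1:].strip() + " "
--             else:
--                 # New question encountered, save previous Q&A if exists
--                 if current_q and current_a:
--                     qa_pairs.append((current_q.strip(), current_a.strip()))
--                     current_a = ""  # Reset current answer
--                 current_q = line[1:].strip() + " "  # Start new question
--                 collecting_q = True
--         else:
--             # Not a question line, switch to collecting answer
--             collecting_q = False
--             current_a += line + "\n"
--
--     # Don't forget to add the last Q&A pair if the text ends without a new question
--     if current_q and current_a:
--         qa_pairs.append((current_q.strip(), current_a.strip()))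
--
--     return qa_pairs
-- ===== SOURCE B (Python) =====
-- from typing import List, Tuple
--
-- def parse_qa(text: str) -> List[Tuple[str, str]]:
--     """Parse text into (question, answer) pairs by locating each question run's
--     boundaries with index scans and slicing its question/answer blocks directly."""
--     lines = text.split('\n')
--     n = len(lines)
--     k = 0
--     while k < n and not lines[k].startswith('#'):
--         k += 1
--     lead = lines[:k]          # lines before the first question feed its answer
--     pairs = []
--     while k < n:
--         i = k
--         while i < n and lines[i].startswith('#'):
--             i += 1
--         j = i
--         while j < n and not lines[j].startswith('#'):
--             j += 1
--         ans = lead + lines[i:j]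
--         lead = []
--         if ans:
--             q = ''.join(l[1:].strip() + ' ' for l in lines[k:i])
--             pairs.append((q.strip(), '\n'.join(ans).strip()))
--         k = j
--     return pairs
-- ===== Notes on version B (the rewrite author's own statement) =====
-- stated objective: alternative
-- what changed: B drops A's per-line state machine (collecting_q flag, rolling current_q/current_a buffers saved when the NEXT question arrives) and instead scans for each question run's boundary indices, slices the question block and its following answer block straight out of the line list, and emits the pair immediately.
import Mathlib
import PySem

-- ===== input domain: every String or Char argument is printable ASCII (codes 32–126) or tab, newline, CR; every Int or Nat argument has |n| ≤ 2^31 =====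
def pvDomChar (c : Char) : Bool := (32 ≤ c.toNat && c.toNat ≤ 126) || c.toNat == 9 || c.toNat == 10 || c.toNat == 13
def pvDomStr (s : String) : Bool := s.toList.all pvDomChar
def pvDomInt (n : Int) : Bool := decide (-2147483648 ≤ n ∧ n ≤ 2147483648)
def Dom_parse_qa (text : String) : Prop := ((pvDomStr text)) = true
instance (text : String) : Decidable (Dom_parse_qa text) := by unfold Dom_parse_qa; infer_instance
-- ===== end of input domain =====

-- B replaces A's per-line state machine (collecting_q flag, rolling question/answer buffers
-- saved at the NEXT question) by boundary index scans: it locates each question run, slices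
-- the question block and its answer block out of the line list, and emits the pair at once.

-- ===== PORT A =====
-- strip(line[1:]) + " "  — the question fragment a '#'-line contributes
def pvQFrag (line : String) : String :=
  PySem.Str.strip (PySem.Str.slice line (some 1) none) ++ " "

-- one iteration of A's per-line loop; state = (qa_pairs, current_q, current_a, collecting_q)
def pvStepA (st : List (String × String) × String × String × Bool) (line : String) :
    List (String × String) × String × String × Bool :=
  let (qa, q, a, cq) := st
  if PySem.Str.startswith line "#" then
    if cq then (qa, q ++ pvQFrag line, a, true)
    else
      if q ≠ "" ∧ a ≠ "" then
        (qa ++ [(PySem.Str.strip q, PySem.Str.strip a)], pvQFrag line, "", true)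
      else (qa, pvQFrag line, a, true)
  else (qa, q, a ++ line ++ "\n", false)

def parse_qa (text : String) : List (String × String) :=
  let lines := (PySem.Str.split? text "\n").getD []
  let (qa, q, a, _) := lines.foldl pvStepA ([], "", "", false)
  if q ≠ "" ∧ a ≠ "" then qa ++ [(PySem.Str.strip q, PySem.Str.strip a)] else qa

-- ===== PORT B =====
def pvIsQ (l : String) : Bool := PySem.Str.startswith l "#"

-- Source B's outer `while k < n` loop: `rest` is lines[k:]; the inner index scans
-- (`while … startswith('#')`, `while … not startswith('#')`) are the takeWhile/dropWhile
-- splits, the slices lines[k:i] / lines[i:j] are the scanned blocks themselves.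
def pvChunks (rest : List String) (lead : List String) (pairs : List (String × String)) :
    List (String × String) :=
  match rest with
  | [] => pairs
  | x :: xs =>
    let qr := (x :: xs).takeWhile pvIsQ
    let r1 := (x :: xs).dropWhile pvIsQ
    let ar := r1.takeWhile (fun l => !pvIsQ l)
    let r2 := r1.dropWhile (fun l => !pvIsQ l)
    let ans := lead ++ ar
    let pairs' :=
      if ans ≠ [] then
        pairs ++ [(PySem.Str.strip (PySem.Str.join "" (qr.map pvQFrag)),
                   PySem.Str.strip (PySem.Str.join "\n" ans))]
      else pairs
    pvChunks r2 [] pairs'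
termination_by rest.length
decreasing_by
  by_cases h : pvIsQ x
  · calc (List.dropWhile (fun l => !pvIsQ l) (List.dropWhile pvIsQ (x :: xs))).length
        ≤ (List.dropWhile pvIsQ (x :: xs)).length := List.length_dropWhile_le _ _
      _ = (List.dropWhile pvIsQ xs).length := by rw [List.dropWhile_cons, if_pos h]
      _ ≤ xs.length := List.length_dropWhile_le _ _
      _ < (x :: xs).length := by simp
  · have h1 : List.dropWhile pvIsQ (x :: xs) = x :: xs := by
      rw [List.dropWhile_cons, if_neg h]
    rw [h1, List.dropWhile_cons, if_pos (by simp [h])]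
    calc (List.dropWhile (fun l => !pvIsQ l) xs).length
        ≤ xs.length := List.length_dropWhile_le _ _
      _ < (x :: xs).length := by simp

def parse_qa_alt (text : String) : List (String × String) :=
  let lines := (PySem.Str.split? text "\n").getD []
  let lead := lines.takeWhile (fun l => !pvIsQ l)
  let rest := lines.dropWhile (fun l => !pvIsQ l)
  pvChunks rest lead []

-- ===== PRECONDITION & SPEC =====
def Spec_parse_qa (text : String) (out : List (String × String)) : Prop := out = parse_qa_alt text
instance (text : String) (out : List (String × String)) : Decidable (Spec_parse_qa text out) := by unfold Spec_parse_qa; infer_instance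

-- ===== CLAIM (what is proved, stated in full; the proofs are below) =====
def Claim_equal_parse_qa : Prop := ∀ (text : String), Dom_parse_qa text → Spec_parse_qa text (parse_qa text)

-- ===== LEMMAS AND PROOFS =====

-- A's final save, as a function of the loop state
def pvFinish (st : List (String × String) × String × String × Bool) : List (String × String) :=
  if st.2.1 ≠ "" ∧ st.2.2.1 ≠ "" then
    st.1 ++ [(PySem.Str.strip st.2.1, PySem.Str.strip st.2.2.1)]
  else st.1

-- ''.join(l + '\n' for l in L) — the string A accumulates from answer lines L
def pvJoinNL (L : List String) : String :=
  PySem.Str.join "" (L.map (fun l => l ++ "\n"))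

-- ''.join with an empty separator flattens
theorem pvFlat (l : List (List Char)) : (List.intersperse ([] : List Char) l).flatten = l.flatten := by
  induction l with
  | nil => rfl
  | cons x t ih => cases t <;> simp_all [List.intersperse]

theorem pvJoin_cons (x : String) (r : List String) :
    PySem.Str.join "" (x :: r) = x ++ PySem.Str.join "" r := by
  apply String.ext
  simp [PySem.Str.join, PySem.Chars.join, List.intercalate, pvFlat]

theorem pvJoin_nil : PySem.Str.join "" ([] : List String) = "" := by
  apply String.ext
  simp [PySem.Str.join, PySem.Chars.join, List.intercalate]

theorem pvJoinNL_nil : pvJoinNL [] = "" := by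
  apply String.ext
  simp [pvJoinNL, PySem.Str.join, PySem.Chars.join, List.intercalate]

theorem pvJoinNL_cons (x : String) (t : List String) :
    pvJoinNL (x :: t) = (x ++ "\n") ++ pvJoinNL t := by
  simp [pvJoinNL, pvJoin_cons]

theorem pvJoinNL_append (L M : List String) :
    pvJoinNL (L ++ M) = pvJoinNL L ++ pvJoinNL M := by
  induction L with
  | nil => simp [pvJoinNL_nil]
  | cons x t ih => simp [pvJoinNL_cons, ih, String.append_assoc]

theorem pvAppend_ne_empty (a b : String) (h : b ≠ "") : a ++ b ≠ "" := by
  intro hc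
  apply h
  apply String.ext
  have := congrArg String.toList hc
  simp [String.toList_append] at this
  simpa using this.2

theorem pvJoinNL_ne_empty (L : List String) (h : L ≠ []) : pvJoinNL L ≠ "" := by
  match L with
  | x :: t =>
    rw [pvJoinNL_cons]
    intro hc
    have := congrArg String.toList hc
    simp [String.toList_append] at this

theorem pvQFrag_ne_empty (x : String) : pvQFrag x ≠ "" := by
  apply pvAppend_ne_empty
  intro hc
  have := congrArg String.toList hc
  simp at this

-- the joined question of a run is nonempty
theorem pvQJoin_ne_empty (x : String) (t : List String) :
    PySem.Str.join "" ((x :: t).map pvQFrag) ≠ "" := by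
  rw [List.map_cons, pvJoin_cons]
  intro hc
  apply pvQFrag_ne_empty x
  apply String.ext
  have := congrArg String.toList hc
  simp [String.toList_append] at this
  simpa using this.1

-- ''.join(l+'\n') is '\n'.join(...) plus a trailing newline (nonempty list)
theorem pvJoinNL_eq_joinSep (L : List String) (h : L ≠ []) :
    pvJoinNL L = PySem.Str.join "\n" L ++ "\n" := by
  match L with
  | [x] =>
    rw [pvJoinNL_cons, pvJoinNL_nil]
    apply String.ext
    simp [PySem.Str.join, PySem.Chars.join_singleton]
  | x :: y :: t =>
    rw [pvJoinNL_cons, pvJoinNL_eq_joinSep (y :: t) (by simp)]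
    apply String.ext
    simp [PySem.Str.join, PySem.Chars.join_cons_cons, String.toList_append]

theorem pvDropNL (l : List Char) :
    List.dropWhile PySem.Chars.isspace (l ++ ['\n']) =
      if List.dropWhile PySem.Chars.isspace l = [] then []
      else List.dropWhile PySem.Chars.isspace l ++ ['\n'] := by
  induction l with
  | nil => simp [List.dropWhile]; decide
  | cons c t ih =>
    by_cases h : PySem.Chars.isspace c
    · simpa [h] using ih
    · simp [h]

-- Python strip ignores a trailing newline
theorem pvStripNL (s : String) : PySem.Str.strip (s ++ "\n") = PySem.Str.strip s := by
  simp only [PySem.Str.strip, PySem.Chars.strip, PySem.Chars.lstrip, PySem.Chars.rstrip]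
  congr 1
  rw [show (s ++ "\n").toList = s.toList ++ ['\n'] by simp]
  rw [pvDropNL]
  split
  · simp [*]
  · rw [List.reverse_append]
    simp [show PySem.Chars.isspace '\n' = true by decide]

-- strip of A's accumulated answer = strip of Source B's '\n'.join of the same lines
theorem pvStrip_joinNL (L : List String) (h : L ≠ []) :
    PySem.Str.strip (pvJoinNL L) = PySem.Str.strip (PySem.Str.join "\n" L) := by
  rw [pvJoinNL_eq_joinSep L h, pvStripNL]

-- step-evaluation lemmas for A's loop body
theorem pvStepA_ans (ps : List (String × String)) (q a x : String) (b : Bool)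
    (hx : PySem.Str.startswith x "#" = false) :
    pvStepA (ps, q, a, b) x = (ps, q, a ++ x ++ "\n", false) := by
  simp [pvStepA, show PySem.Chars.startswith x.toList ['#'] = false by simpa using hx]

theorem pvStepA_q_cont (ps : List (String × String)) (q a x : String)
    (hx : PySem.Str.startswith x "#" = true) :
    pvStepA (ps, q, a, true) x = (ps, q ++ pvQFrag x, a, true) := by
  simp [pvStepA, show PySem.Chars.startswith x.toList ['#'] = true by simpa using hx]

theorem pvStepA_q_save (ps : List (String × String)) (q a x : String)
    (hx : PySem.Str.startswith x "#" = true) (hg : q ≠ "" ∧ a ≠ "") :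
    pvStepA (ps, q, a, false) x
      = (ps ++ [(PySem.Str.strip q, PySem.Str.strip a)], pvQFrag x, "", true) := by
  simp [pvStepA, show PySem.Chars.startswith x.toList ['#'] = true by simpa using hx,
        hg.1, hg.2]

theorem pvStepA_q_nosave (ps : List (String × String)) (q a x : String)
    (hx : PySem.Str.startswith x "#" = true) (hg : ¬(q ≠ "" ∧ a ≠ "")) :
    pvStepA (ps, q, a, false) x = (ps, pvQFrag x, a, true) := by
  have hg' : ¬(¬q = "" ∧ ¬a = "") := by simpa using hg
  simp [pvStepA, show PySem.Chars.startswith x.toList ['#'] = true by simpa using hx, hg']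

-- A over a run of question lines with the flag up: the fragments accumulate onto current_q
theorem pvL1 (r rest : List String) (hq : ∀ y ∈ r, PySem.Str.startswith y "#" = true)
    (ps : List (String × String)) (q a : String) :
    (r ++ rest).foldl pvStepA (ps, q, a, true)
      = rest.foldl pvStepA (ps, q ++ PySem.Str.join "" (r.map pvQFrag), a, true) := by
  induction r generalizing q with
  | nil => simp [pvJoin_nil]
  | cons x r ih =>
    have hx := hq x (by simp)
    rw [List.cons_append, List.foldl_cons, pvStepA_q_cont _ _ _ _ hx,
        ih (fun y hy => hq y (by simp [hy]))]
    simp [List.map_cons, pvJoin_cons, String.append_assoc]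

-- A over a run of answer lines: the lines accumulate onto current_a
theorem pvL2 (r rest : List String) (ha : ∀ y ∈ r, PySem.Str.startswith y "#" = false)
    (ps : List (String × String)) (q a : String) (b : Bool) :
    (r ++ rest).foldl pvStepA (ps, q, a, b)
      = rest.foldl pvStepA (ps, q, a ++ pvJoinNL r, if r = [] then b else false) := by
  induction r generalizing a b with
  | nil => simp [pvJoinNL_nil]
  | cons x r ih =>
    have hx := ha x (by simp)
    rw [List.cons_append, List.foldl_cons, pvStepA_ans _ _ _ _ _ hx,
        ih (fun y hy => ha y (by simp [hy]))]
    cases r <;> simp [pvJoinNL_cons, pvJoinNL_nil, String.append_assoc]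

-- one unfolding of Source B's chunk loop at a nonempty suffix
theorem pvChunks_cons (x : String) (xs lead : List String) (pairs : List (String × String)) :
    pvChunks (x :: xs) lead pairs =
      pvChunks (((x :: xs).dropWhile pvIsQ).dropWhile (fun l => !pvIsQ l)) []
        (if lead ++ ((x :: xs).dropWhile pvIsQ).takeWhile (fun l => !pvIsQ l) ≠ [] then
          pairs ++ [(PySem.Str.strip (PySem.Str.join "" (((x :: xs).takeWhile pvIsQ).map pvQFrag)),
                     PySem.Str.strip (PySem.Str.join "\n" (lead ++ ((x :: xs).dropWhile pvIsQ).takeWhile (fun l => !pvIsQ l))))]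
         else pairs) := by
  rw [pvChunks]

-- main invariant: from a question boundary, A's remaining fold + final save = Source B's chunk loop
theorem pvMainB : ∀ (n : Nat) (rest : List String), rest.length ≤ n →
    (∀ h ∈ rest.head?, pvIsQ h = true) →
    ∀ (ps : List (String × String)) (lead : List String),
    pvFinish (rest.foldl pvStepA (ps, "", pvJoinNL lead, false)) = pvChunks rest lead ps := by
  intro n
  induction n with
  | zero =>
    intro rest hl _ ps lead
    have h0 : rest = [] := List.eq_nil_of_length_eq_zero (Nat.le_zero.mp hl)
    subst h0
    simp [pvChunks, pvFinish]
  | succ n ih =>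
    intro rest hl hhead ps lead
    cases rest with
    | nil => simp [pvChunks, pvFinish]
    | cons x xs =>
      have hx : pvIsQ x = true := hhead x (by simp)
      have hxS : PySem.Str.startswith x "#" = true := hx
      rw [pvChunks_cons]
      rw [show (x :: xs).dropWhile pvIsQ = xs.dropWhile pvIsQ from by
        rw [List.dropWhile_cons, if_pos hx]]
      rw [show (x :: xs).takeWhile pvIsQ = x :: xs.takeWhile pvIsQ from by
        rw [List.takeWhile_cons, if_pos hx]]
      set qrt := xs.takeWhile pvIsQ with hqrt
      set r1 := xs.dropWhile pvIsQ with hr1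
      have hxs : xs = qrt ++ r1 := (List.takeWhile_append_dropWhile).symm
      have hq_all : ∀ y ∈ qrt, PySem.Str.startswith y "#" = true := by
        intro y hy
        have hy' : y ∈ xs.takeWhile pvIsQ := by rw [← hqrt]; exact hy
        exact List.mem_takeWhile_imp (p := pvIsQ) hy'
      -- run A over the question block
      conv_lhs => rw [hxs]
      rw [List.foldl_cons, pvStepA_q_nosave _ _ _ _ hxS (by simp), pvL1 qrt r1 hq_all]
      rw [show pvQFrag x ++ PySem.Str.join "" (qrt.map pvQFrag)
            = PySem.Str.join "" ((x :: qrt).map pvQFrag) from by simp [pvJoin_cons]]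
      set Q := PySem.Str.join "" ((x :: qrt).map pvQFrag) with hQdef
      have hQne : Q ≠ "" := pvQJoin_ne_empty x qrt
      cases hr1c : r1 with
      | nil =>
        simp only [List.foldl_nil, List.takeWhile_nil, List.dropWhile_nil]
        by_cases hlead : lead = []
        · subst hlead
          simp [pvFinish, pvJoinNL_nil, pvChunks]
        · rw [if_pos (by simp [hlead])]
          simp only [List.append_nil]
          rw [show pvChunks [] [] (ps ++ [(PySem.Str.strip Q, PySem.Str.strip (PySem.Str.join "\n" lead))]) = ps ++ [(PySem.Str.strip Q, PySem.Str.strip (PySem.Str.join "\n" lead))] from by rw [pvChunks]]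
          rw [pvFinish, if_pos ⟨hQne, pvJoinNL_ne_empty lead hlead⟩]
          rw [pvStrip_joinNL lead hlead]
      | cons y r1t =>
        have hy : pvIsQ y = false := by
          have h := List.head?_dropWhile_not pvIsQ xs
          rw [← hr1, hr1c] at h
          exact h
        set art := r1t.takeWhile (fun l => !pvIsQ l) with hart
        set r2 := r1t.dropWhile (fun l => !pvIsQ l) with hr2
        rw [show (y :: r1t).takeWhile (fun l => !pvIsQ l) = y :: art from by
          rw [List.takeWhile_cons, if_pos (by simp [hy])]]
        rw [show (y :: r1t).dropWhile (fun l => !pvIsQ l) = r2 from by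
          rw [List.dropWhile_cons, if_pos (by simp [hy])]]
        have ha_all : ∀ y' ∈ y :: art, PySem.Str.startswith y' "#" = false := by
          intro y' hy'
          rcases List.mem_cons.mp hy' with h | h
          · subst h; exact hy
          · have h' : y' ∈ r1t.takeWhile (fun l => !pvIsQ l) := by rw [← hart]; exact h
            have : (!pvIsQ y') = true := List.mem_takeWhile_imp (p := fun l => !pvIsQ l) h'
            simpa [pvIsQ] using this
        have hr1d : r1t = art ++ r2 := (List.takeWhile_append_dropWhile).symm
        rw [show (y :: r1t) = (y :: art) ++ r2 from by rw [List.cons_append, ← hr1d]]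
        rw [pvL2 (y :: art) r2 ha_all, if_neg (by simp)]
        set A1 := pvJoinNL lead ++ pvJoinNL (y :: art) with hA1def
        have harne : (y :: art) ≠ [] := by simp
        have hA1ne : A1 ≠ "" := pvAppend_ne_empty _ _ (pvJoinNL_ne_empty _ harne)
        have hansne : lead ++ y :: art ≠ [] := by simp
        have hstrip : PySem.Str.strip A1 = PySem.Str.strip (PySem.Str.join "\n" (lead ++ y :: art)) := by
          rw [hA1def, ← pvJoinNL_append, pvStrip_joinNL _ (by simp)]
        rw [if_pos hansne]
        set ps' := ps ++ [(PySem.Str.strip Q, PySem.Str.strip (PySem.Str.join "\n" (lead ++ y :: art)))] with hps'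
        cases hr2c : r2 with
        | nil =>
          rw [List.foldl_nil]
          rw [show pvChunks [] [] ps' = ps' from by rw [pvChunks]]
          rw [pvFinish, if_pos ⟨hQne, hA1ne⟩]
          simp only [hps', hstrip]
        | cons z r2t =>
          have hz : pvIsQ z = true := by
            have h := List.head?_dropWhile_not (fun l => !pvIsQ l) r1t
            rw [← hr2, hr2c] at h
            simpa using h
          rw [List.foldl_cons, pvStepA_q_save _ _ _ _ hz ⟨hQne, hA1ne⟩, hstrip]
          have hlen : (z :: r2t).length ≤ n := by
            have h1 : r2.length ≤ r1t.length := hr2 ▸ List.length_dropWhile_le _ _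
            have h2 : r1.length ≤ xs.length := hr1 ▸ List.length_dropWhile_le _ _
            rw [hr2c] at h1
            rw [hr1c] at h2
            simp only [List.length_cons] at h1 h2 hl ⊢
            omega
          have := ih (z :: r2t) hlen (by intro h hh; simp at hh; subst hh; exact hz) ps' []
          rw [List.foldl_cons, pvJoinNL_nil, pvStepA_q_nosave _ _ _ _ hz (by simp)] at this
          exact this

-- ===== VERDICT (by name: the statement is the Claim_ definition above) =====
theorem parse_qa_spec : Claim_equal_parse_qa := by
  intro text _
  unfold Spec_parse_qa parse_qa parse_qa_alt
  dsimp only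
  generalize (PySem.Str.split? text "\n").getD [] = lines
  have key : ∀ st : List (String × String) × String × String × Bool,
      (if st.2.1 ≠ "" ∧ st.2.2.1 ≠ "" then
        st.1 ++ [(PySem.Str.strip st.2.1, PySem.Str.strip st.2.2.1)] else st.1) = pvFinish st :=
    fun _ => rfl
  rw [key]
  have hlead_all : ∀ y ∈ lines.takeWhile (fun l => !pvIsQ l), PySem.Str.startswith y "#" = false := by
    intro y hy
    have : (!pvIsQ y) = true := List.mem_takeWhile_imp (p := fun l => !pvIsQ l) hy
    simpa [pvIsQ] using this
  have hhead : ∀ h ∈ (lines.dropWhile (fun l => !pvIsQ l)).head?, pvIsQ h = true := by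
    intro h hh
    have hlem := List.head?_dropWhile_not (fun l => !pvIsQ l) lines
    cases hc : (lines.dropWhile (fun l => !pvIsQ l)).head? with
    | none => simp [hc] at hh
    | some z =>
      rw [hc] at hlem
      simp [hc] at hh
      subst hh
      simpa using hlem
  set lead := lines.takeWhile (fun l => !pvIsQ l) with hlead
  set rest := lines.dropWhile (fun l => !pvIsQ l) with hrest
  conv_lhs => rw [show lines = lead ++ rest from List.takeWhile_append_dropWhile.symm]
  rw [pvL2 lead rest hlead_all, ite_self, String.empty_append]
  exact pvMainB rest.length rest le_rfl hhead [] lead
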